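-- pv_equiv track=rewrite | github.com/kwoodson/adventofcode | 2024/advents/day2/day.py | check_order_recur
-- ===== SOURCE A (Python) =====
-- def check_order_recur(report, errors):
--     if errors > 1:
--         return False
--
--     if len(report) == 1 or (len(report) == 2 and errors == 0):
--         return True
--
--     if 1 <= (report[1] - report[0] ) <= 3:
--         return check_order_recur(report[1:], errors)
--
--     # if next is larger then skip current
--     # 0->1 doesn't work, skip 0
--
--
--     elif len(report) >= 3 and 1 <= (report[2] - report[0] ) <= 3:
--             return check_order_recur(report[0:1] + report[2:], errors + 1)
--
--     return False
-- ===== SOURCE B (Python) =====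
-- def check_order_recur(report, errors):
--     # Iterative one-pass rewrite: walk an index over the original list with a
--     # 'prev' value instead of building sliced copies; same greedy skip rule.
--     if errors > 1:
--         return False
--     n = len(report)
--     prev = report[0]
--     j = 1
--     m = n                      # length of the virtual list [prev] + report[j:]
--     while True:
--         if errors > 1:
--             return False
--         if m == 1 or (m == 2 and errors == 0):
--             return True
--         if 1 <= report[j] - prev <= 3:
--             prev = report[j]
--         elif m >= 3 and 1 <= report[j + 1] - prev <= 3:
--             errors += 1
--         else:
--             return False
--         j += 1
--         m -= 1
-- ===== Notes on version B (the rewrite author's own statement) =====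
-- stated objective: alternative
-- what changed: Replaces A's tail recursion that rebuilds sliced list copies (report[1:], report[0:1]+report[2:]) at every step with a single iterative index walk over the original list, tracking only (prev, index, remaining length, errors).
import Mathlib
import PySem

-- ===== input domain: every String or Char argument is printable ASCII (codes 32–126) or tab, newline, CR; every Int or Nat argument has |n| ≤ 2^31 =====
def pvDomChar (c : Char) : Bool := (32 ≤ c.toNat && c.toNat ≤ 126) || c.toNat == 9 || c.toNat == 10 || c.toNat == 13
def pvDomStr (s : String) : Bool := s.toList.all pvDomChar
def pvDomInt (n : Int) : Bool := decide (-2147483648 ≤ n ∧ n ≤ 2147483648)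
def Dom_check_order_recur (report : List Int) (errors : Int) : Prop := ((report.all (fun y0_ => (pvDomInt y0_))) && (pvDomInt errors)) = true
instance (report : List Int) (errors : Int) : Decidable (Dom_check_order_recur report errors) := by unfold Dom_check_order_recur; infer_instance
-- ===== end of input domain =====

-- B replaces A's recursion-with-slicing by a single index walk over the original
-- list (objective: alternative decomposition, no list copies).

-- ===== PORT A =====
-- literal port of A's recursion; list indexing via PySem.List.pyGet? (getD 0 is
-- only reached on the empty list, which Pre_ excludes because Python raises there)
def check_order_recur (report : List Int) (errors : Int) : Bool :=
  if errors > 1 then false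
  else if report.length = 1 ∨ (report.length = 2 ∧ errors = 0) then true
  else if h1 : 1 ≤ (PySem.List.pyGet? report 1).getD 0 - (PySem.List.pyGet? report 0).getD 0 ∧
               (PySem.List.pyGet? report 1).getD 0 - (PySem.List.pyGet? report 0).getD 0 ≤ 3 then
    check_order_recur (PySem.List.slice report (some 1) none) errors
  else if h2 : 3 ≤ report.length ∧
               (1 ≤ (PySem.List.pyGet? report 2).getD 0 - (PySem.List.pyGet? report 0).getD 0 ∧
                (PySem.List.pyGet? report 2).getD 0 - (PySem.List.pyGet? report 0).getD 0 ≤ 3) then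
    check_order_recur (PySem.List.slice report (some 0) (some 1) ++ PySem.List.slice report (some 2) none) (errors + 1)
  else false
termination_by report.length
decreasing_by
  · rcases report with _ | ⟨a, r⟩
    · simp [PySem.List.pyGet?, PySem.List.pyIdx?] at h1
    · simp [PySem.List.slice_from_one]
  · obtain ⟨h3, -⟩ := h2
    simp [PySem.List.slice, PySem.List.clampIdx]
    omega

-- ===== PORT B =====
-- the while loop of Source B: state (prev, j, m, errors); m = 0 is a totality guard
-- only (the loop is entered with m = len(report) ≥ 1 under Pre_)
def pvAltLoop (report : List Int) (prev : Int) (j : Int) (m : Nat) (errors : Int) : Bool :=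
  if errors > 1 then false
  else if m = 1 ∨ (m = 2 ∧ errors = 0) then true
  else
    match m with
    | 0 => false
    | m' + 1 =>
      if 1 ≤ (PySem.List.pyGet? report j).getD 0 - prev ∧
         (PySem.List.pyGet? report j).getD 0 - prev ≤ 3 then
        pvAltLoop report ((PySem.List.pyGet? report j).getD 0) (j + 1) m' errors
      else if 3 ≤ m' + 1 ∧ (1 ≤ (PySem.List.pyGet? report (j + 1)).getD 0 - prev ∧
                            (PySem.List.pyGet? report (j + 1)).getD 0 - prev ≤ 3) then
        pvAltLoop report prev (j + 1) m' (errors + 1)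
      else false
termination_by m

def check_order_recur_alt (report : List Int) (errors : Int) : Bool :=
  if errors > 1 then false
  else pvAltLoop report ((PySem.List.pyGet? report 0).getD 0) 1 report.length errors

-- ===== PRECONDITION & SPEC =====
-- Pre_ excludes the inputs on which Python A raises IndexError: an empty report
-- with errors ≤ 1 (A indexes report[1] there); everywhere else A returns.
def Pre_check_order_recur (report : List Int) (errors : Int) : Prop :=
  report ≠ [] ∨ errors > 1
instance (report : List Int) (errors : Int) : Decidable (Pre_check_order_recur report errors) := by unfold Pre_check_order_recur; infer_instance

def pvWitness_check_order_recur : List Int × Int := ([1, 2, 4, 5], 0)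

def Spec_check_order_recur (report : List Int) (errors : Int) (out : Bool) : Prop := out = check_order_recur_alt report errors
instance (report : List Int) (errors : Int) (out : Bool) : Decidable (Spec_check_order_recur report errors out) := by unfold Spec_check_order_recur; infer_instance

-- ===== CLAIM (what is proved, stated in full; the proofs are below) =====
def Claim_equal_check_order_recur : Prop := ∀ (report : List Int) (errors : Int), Dom_check_order_recur report errors → Pre_check_order_recur report errors → Spec_check_order_recur report errors (check_order_recur report errors)

-- ===== LEMMAS AND PROOFS =====

-- the loop invariant: if report.drop j.toNat = r, the loop state (prev, j, m = |r|+1)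
-- computes exactly A's recursion on the virtual list prev :: r
lemma pvLoop_eq (r : List Int) : ∀ (report : List Int) (j prev errors : Int),
    0 ≤ j → report.drop j.toNat = r →
    pvAltLoop report prev j (r.length + 1) errors = check_order_recur (prev :: r) errors := by
  induction r with
  | nil =>
    intro report j prev errors hj hd
    rw [pvAltLoop, check_order_recur]
    simp
  | cons x rest ih =>
    intro report j prev errors hj hd
    have hget : PySem.List.pyGet? report j = some x := by
      rw [PySem.List.pyGet?_of_nonneg report hj]
      have : report[j.toNat]? = (report.drop j.toNat)[0]? := by
        simp [List.getElem?_drop]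
      rw [this, hd]; rfl
    have hget1 : PySem.List.pyGet? report (j + 1) = rest[0]? := by
      rw [PySem.List.pyGet?_of_nonneg report (by omega : (0:Int) ≤ j + 1)]
      have h1 : (j + 1).toNat = j.toNat + 1 := by omega
      have : report[j.toNat + 1]? = (report.drop j.toNat)[1]? := by
        simp [List.getElem?_drop]
      rw [h1, this, hd]; rfl
    have hdrop : report.drop (j + 1).toNat = rest := by
      have h1 : (j + 1).toNat = j.toNat + 1 := by omega
      rw [h1, ← List.drop_drop, hd]
      rfl
    have ha1 : PySem.List.pyGet? (prev :: x :: rest) 1 = some x := by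
      have e : (1 : Int) = ((1 : Nat) : Int) := rfl
      rw [e, PySem.List.pyGet?_natCast]; rfl
    have ha0 : PySem.List.pyGet? (prev :: x :: rest) 0 = some prev :=
      PySem.List.pyGet?_zero_cons _ _
    rw [pvAltLoop, check_order_recur]
    simp only [hget, hget1, ha1, ha0, Option.getD_some, List.length_cons]
    have hs1 : PySem.List.slice (prev :: x :: rest) (some 1) none = x :: rest :=
      PySem.List.slice_from_one _
    have hs2 : PySem.List.slice (prev :: x :: rest) (some 0) (some 1) ++
        PySem.List.slice (prev :: x :: rest) (some 2) none = prev :: rest := by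
      have e1 : PySem.List.slice (prev :: x :: rest) (some 0) (some 1) = [prev] := by
        rw [PySem.List.slice_toNat _ (by norm_num) (by norm_num)]; rfl
      have e2 : PySem.List.slice (prev :: x :: rest) (some 2) none = rest := by
        rw [PySem.List.slice_from _ (by norm_num)]; rfl
      rw [e1, e2]; rfl
    rw [hs1, hs2]
    have hpy2 : PySem.List.pyGet? (prev :: x :: rest) 2 = rest[0]? := by
      have e : (2 : Int) = ((2 : Nat) : Int) := rfl
      rw [e, PySem.List.pyGet?_natCast]; rfl
    rw [hpy2]
    by_cases he : errors > 1
    · simp [he]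
    · simp only [if_neg he]
      by_cases hb : rest.length + 1 + 1 = 1 ∨ (rest.length + 1 + 1 = 2 ∧ errors = 0)
      · simp only [if_pos hb]
      · simp only [if_neg hb]
        split_ifs with c1 c2
        · exact ih report (j + 1) x errors (by omega) hdrop
        · exact ih report (j + 1) prev (errors + 1) (by omega) hdrop
        · rfl

theorem check_order_recur_spec : Claim_equal_check_order_recur := by
  intro report errors _ hpre
  unfold Spec_check_order_recur
  rcases report with _ | ⟨a, t⟩
  · rcases hpre with h | h
    · exact absurd rfl h
    · rw [check_order_recur, check_order_recur_alt]
      simp [h]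
  · rw [check_order_recur_alt]
    by_cases he : errors > 1
    · rw [check_order_recur]; simp [he]
    · simp only [if_neg he, PySem.List.pyGet?_zero_cons, Option.getD_some, List.length_cons]
      exact (pvLoop_eq t (a :: t) 1 a errors (by norm_num) rfl).symm
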